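-- pv_equiv track=rewrite | github.com/SilenceLY05/ICEEMDAN-SVD-BES-TWSVM | (4.12)加噪位置区分-基于(4.10)原始信号计算修改-修改SVD(有问题)/ICEEMDAN-BiLSTM-ARIMA/SVD/denoiser.py | split_signal
-- ===== SOURCE A (Python) =====
-- def split_signal(sequence, num_segments=6, overlap_count=200):
--     total_length = len(sequence)
--     segment_lengths = [total_length // num_segments] * num_segments
--     remainder = total_length % num_segments
--
--     # Distribute the remainder among the segments
--     for i in range(remainder):
--         segment_lengths[i] += 1
--
--     segments = []
--     start_index = 0
--     for length in segment_lengths[:-1]:  # Exclude the last segment for special treatment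
--         segments.append(sequence[start_index:start_index + length + overlap_count])
--         start_index += length
--
--     # Add the last segment without the extra overlap
--     segments.append(sequence[start_index:])
--     return segments
-- ===== SOURCE B (Python) =====
-- def split_signal(sequence, num_segments=6, overlap_count=200):
--     # Single peel-off loop: each step takes ceil(remaining/k) elements via ceiling
--     # division (which reproduces the q/q+1 distribution), instead of building a
--     # lengths list, distributing the remainder, and accumulating a start index.
--     n = len(sequence)
--     segments = []
--     start, k = 0, num_segments
--     while k > 1:
--         length = -((start - n) // k)  # ceil((n - start) / k)
--         segments.append(sequence[start:start + length + overlap_count])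
--         start += length
--         k -= 1
--     segments.append(sequence[start:])
--     return segments
-- ===== Notes on version B (the rewrite author's own statement) =====
-- stated objective: alternative
-- what changed: Replaces A's staged passes (build a lengths list, distribute the remainder in a loop, then accumulate a running start index while slicing) by a single peel-off loop that at each step takes ceil(remaining/k) elements via ceiling division, with no lengths list and no remainder bookkeeping.
import Mathlib
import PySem

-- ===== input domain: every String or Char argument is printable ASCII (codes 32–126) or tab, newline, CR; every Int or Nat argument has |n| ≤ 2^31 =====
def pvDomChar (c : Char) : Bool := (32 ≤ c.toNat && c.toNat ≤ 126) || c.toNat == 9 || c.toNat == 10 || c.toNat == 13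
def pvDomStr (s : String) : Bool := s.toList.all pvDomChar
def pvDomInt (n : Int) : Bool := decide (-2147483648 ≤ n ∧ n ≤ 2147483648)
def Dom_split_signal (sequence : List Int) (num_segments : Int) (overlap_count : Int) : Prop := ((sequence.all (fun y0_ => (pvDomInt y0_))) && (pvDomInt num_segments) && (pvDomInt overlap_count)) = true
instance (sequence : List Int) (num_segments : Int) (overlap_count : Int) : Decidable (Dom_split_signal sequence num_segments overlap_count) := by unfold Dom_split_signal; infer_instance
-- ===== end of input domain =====

-- B replaces A's staged passes (lengths list + remainder loop + running start index) by a
-- recursive peel-off taking ceil(remaining/k) elements per step (objective: alternative).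


-- ===== PORT A =====
def split_signal (sequence : List Int) (num_segments : Int) (overlap_count : Int) : List (List Int) :=
  let total_length : Int := sequence.length
  -- [x] * n : empty for n ≤ 0, like Python
  let segment_lengths : List Int :=
    List.replicate num_segments.toNat (PySem.Int.floordiv total_length num_segments)
  let remainder : Int := PySem.Int.mod total_length num_segments
  -- for i in range(remainder): segment_lengths[i] += 1
  let segment_lengths : List Int :=
    (PySem.List.pyRange 0 remainder 1).foldl
      (fun ls i => PySem.List.pySetD ls i (PySem.List.pyGetD ls i 0 + 1)) segment_lengths
  -- for length in segment_lengths[:-1]: …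
  let step : List (List Int) × Int :=
    (PySem.List.slice segment_lengths none (some (-1))).foldl
      (fun (st : List (List Int) × Int) length =>
        (st.1 ++ [PySem.List.slice sequence (some st.2) (some (st.2 + length + overlap_count))],
         st.2 + length))
      ([], 0)
  step.1 ++ [PySem.List.slice sequence (some step.2) none]

-- ===== PORT B =====
-- the while loop: peel one segment of ceil((n-start)/k) elements per iteration
def pvLoop (sequence : List Int) (overlap_count : Int) (n : Int)
    (segments : List (List Int)) (start : Int) (k : Int) : List (List Int) :=
  if h : 1 < k then
    let length : Int := -(PySem.Int.floordiv (start - n) k)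
    pvLoop sequence overlap_count n
      (segments ++ [PySem.List.slice sequence (some start) (some (start + length + overlap_count))])
      (start + length) (k - 1)
  else
    segments ++ [PySem.List.slice sequence (some start) none]
termination_by k.toNat
decreasing_by omega

def split_signal_alt (sequence : List Int) (num_segments : Int) (overlap_count : Int) : List (List Int) :=
  pvLoop sequence overlap_count (sequence.length : Int) [] 0 num_segments

-- ===== PRECONDITION & SPEC =====
-- Pre_ excludes only num_segments = 0, where A raises ZeroDivisionError.
def Pre_split_signal (sequence : List Int) (num_segments : Int) (overlap_count : Int) : Prop :=
  num_segments ≠ 0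
instance (sequence : List Int) (num_segments : Int) (overlap_count : Int) : Decidable (Pre_split_signal sequence num_segments overlap_count) := by unfold Pre_split_signal; infer_instance
def pvWitness_split_signal : List Int × Int × Int := ([1, 2, 3, 4, 5], 2, 1)

def Spec_split_signal (sequence : List Int) (num_segments : Int) (overlap_count : Int) (out : List (List Int)) : Prop := out = split_signal_alt sequence num_segments overlap_count
instance (sequence : List Int) (num_segments : Int) (overlap_count : Int) (out : List (List Int)) : Decidable (Spec_split_signal sequence num_segments overlap_count out) := by unfold Spec_split_signal; infer_instance

-- ===== CLAIM (what is proved, stated in full; the proofs are below) =====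
def Claim_equal_split_signal : Prop := ∀ (sequence : List Int) (num_segments : Int) (overlap_count : Int), Dom_split_signal sequence num_segments overlap_count → Pre_split_signal sequence num_segments overlap_count → Spec_split_signal sequence num_segments overlap_count (split_signal sequence num_segments overlap_count)

-- ===== LEMMAS AND PROOFS =====

-- the cut boundary before segment j, in closed form
def pvBnd (q r : Int) (j : Nat) : Int := (j : Int) * q + min (j : Int) r

-- the lengths list after A's remainder-distribution loop, in closed form
lemma distribute_eq (q : Int) (m : Nat) :
    ∀ (k : Nat), k ≤ m →
    (PySem.List.pyRange 0 (k : Int) 1).foldl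
      (fun ls i => PySem.List.pySetD ls i (PySem.List.pyGetD ls i 0 + 1)) (List.replicate m q)
    = (List.range m).map (fun (j : Nat) => if (j : Int) < (k : Int) then q + 1 else q) := by
  intro k hk
  induction k with
  | zero =>
      rw [PySem.List.pyRange_one_eq_nil (by norm_num)]
      simp only [List.foldl_nil]
      apply List.ext_getElem
      · simp
      · intro j h1 h2
        simp only [List.getElem_replicate, List.getElem_map, List.getElem_range]
        rw [if_neg (by push_cast; omega)]
  | succ k ih =>
      have hk' : k ≤ m := Nat.le_of_succ_le hk
      have hkm : k < m := hk
      have hcast : ((k + 1 : Nat) : Int) = (k : Int) + 1 := by push_cast; ring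
      rw [hcast, PySem.List.pyRange_one_succ_right (by positivity),
          List.foldl_append, ih hk']
      simp only [List.foldl_cons, List.foldl_nil]
      rw [PySem.List.pySetD_natCast, PySem.List.pyGetD_natCast]
      have hlen : k < ((List.range m).map
          (fun (j : Nat) => if (j : Int) < (k : Int) then q + 1 else q)).length := by simp [hkm]
      rw [List.getD_eq_getElem _ _ hlen]
      simp only [List.getElem_map, List.getElem_range]
      rw [if_neg (lt_irrefl _)]
      apply List.ext_getElem
      · simp
      · intro j hj hj'
        have hjm : j < m := by simpa using hj'
        simp only [List.getElem_set, List.getElem_map, List.getElem_range]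
        by_cases h : k = j
        · subst h
          rw [if_pos rfl, if_pos (by omega)]
        · rw [if_neg h]
          by_cases hjk : (j : Int) < (k : Int)
          · rw [if_pos hjk, if_pos (by omega)]
          · rw [if_neg hjk, if_neg (by omega)]

-- A's segment-building fold, in closed form over prefix sums
lemma fold_spec (seq : List Int) (oc : Int) :
    ∀ (L : List Int) (segs0 : List (List Int)) (s0 : Int),
    L.foldl
      (fun (st : List (List Int) × Int) length =>
        (st.1 ++ [PySem.List.slice seq (some st.2) (some (st.2 + length + oc))], st.2 + length))
      (segs0, s0)
    = (segs0 ++ (List.range L.length).map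
         (fun i => PySem.List.slice seq (some (s0 + (L.take i).sum))
                     (some (s0 + (L.take (i + 1)).sum + oc))),
       s0 + L.sum) := by
  intro L
  induction L with
  | nil => intro segs0 s0; simp
  | cons a L ih =>
      intro segs0 s0
      simp only [List.foldl_cons]
      rw [ih]
      simp only [Prod.mk.injEq]
      constructor
      · simp only [List.length_cons]
        rw [List.range_succ_eq_map, List.map_cons, List.map_map]
        simp only [List.take_zero, List.sum_nil, add_zero, List.take_succ_cons, List.sum_cons]
        rw [List.append_assoc, List.singleton_append]
        congr 1
        congr 1
        apply List.map_congr_left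
        intro i _
        simp only [Function.comp, List.take_succ_cons, List.sum_cons]
        congr 2 <;> ring
      · simp; ring

-- prefix sums of the distributed lengths list = the closed-form boundaries
lemma take_sum_f (q : Int) (r m : Nat) :
    ∀ (i : Nat), i ≤ m →
    (((List.range m).map (fun (j : Nat) => if (j : Int) < (r : Int) then q + 1 else q)).take i).sum
    = pvBnd q (r : Int) i := by
  intro i hi
  induction i with
  | zero => simp [pvBnd]
  | succ i ih =>
      have hi' : i ≤ m := Nat.le_of_succ_le hi
      have him : i < m := hi
      rw [List.take_add_one, List.sum_append, ih hi']
      simp only [List.getElem?_map, List.getElem?_range, him]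
      simp only [Option.map_some, Option.toList_some, List.sum_cons, List.sum_nil, add_zero]
      unfold pvBnd
      by_cases h : i < r
      · rw [if_pos (by exact_mod_cast h)]
        have h1 : min ((i : Nat) : Int) (r : Int) = (i : Int) := by omega
        have h2 : min (((i + 1 : Nat)) : Int) (r : Int) = (i : Int) + 1 := by push_cast; omega
        push_cast
        rw [h1] at *
        push_cast at h2
        rw [h2]; ring
      · rw [if_neg (by exact_mod_cast h)]
        have h1 : min ((i : Nat) : Int) (r : Int) = (r : Int) := by omega
        have h2 : min (((i + 1 : Nat)) : Int) (r : Int) = (r : Int) := by push_cast; omega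
        push_cast
        rw [h1]
        push_cast at h2
        rw [h2]; ring

-- one ceiling-division step of B advances the start exactly to the next boundary
lemma ceil_step (n q r : Int) (m j : Nat)
    (hn : n = q * (m : Int) + r) (_h0 : 0 ≤ r) (hr : r < (m : Int)) (hj : j < m) :
    -(PySem.Int.floordiv (pvBnd q r j - n) ((m : Int) - (j : Int)))
      = pvBnd q r (j + 1) - pvBnd q r j := by
  have hk : (0 : Int) < (m : Int) - (j : Int) := by
    have : (j : Int) < (m : Int) := by exact_mod_cast hj
    omega
  have hrw : pvBnd q r j - n = -(n - pvBnd q r j) := by ring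
  rw [hrw, PySem.Int.neg_floordiv_neg_eq_iff_of_pos hk]
  unfold pvBnd
  by_cases h : (j : Int) < r
  · have h1 : min (j : Int) r = (j : Int) := by omega
    have h2 : min ((j + 1 : Nat) : Int) r = (j : Int) + 1 := by push_cast; omega
    rw [h1, h2]
    push_cast
    constructor <;> nlinarith
  · have h1 : min (j : Int) r = r := by omega
    have h2 : min ((j + 1 : Nat) : Int) r = r := by push_cast; omega
    rw [h1, h2]
    push_cast
    constructor <;> nlinarith

-- B's loop, in closed form over the boundaries
lemma loop_spec (seq : List Int) (oc n q r : Int) (m : Nat)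
    (hn : n = q * (m : Int) + r) (h0 : 0 ≤ r) (hr : r < (m : Int)) :
    ∀ (kn : Nat), ∀ (j : Nat) (segs : List (List Int)), 1 ≤ kn → j + kn = m →
    pvLoop seq oc n segs (pvBnd q r j) (kn : Int)
    = segs ++ ((List.range' j (kn - 1)).map
        (fun i => PySem.List.slice seq (some (pvBnd q r i)) (some (pvBnd q r (i + 1) + oc)))
      ++ [PySem.List.slice seq (some (pvBnd q r (m - 1))) none]) := by
  intro kn
  induction kn with
  | zero => intro j segs h1 _; exact absurd h1 (by omega)
  | succ kn ih =>
      intro j segs _ hjm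
      by_cases hk0 : kn = 0
      · subst hk0
        rw [pvLoop]
        rw [dif_neg (by norm_num)]
        have hj : j = m - 1 := by omega
        simp [hj]
      · rw [pvLoop]
        rw [dif_pos (by push_cast; omega)]
        have hjlt : j < m := by omega
        have hcast : ((kn + 1 : Nat) : Int) = (m : Int) - (j : Int) := by
          have : j + (kn + 1) = m := hjm
          push_cast
          omega
        have hstart : pvBnd q r j + (pvBnd q r (j + 1) - pvBnd q r j) = pvBnd q r (j + 1) := by
          ring
        have hk2 : (m : Int) - (j : Int) - 1 = ((kn : Nat) : Int) := by
          push_cast at hcast ⊢; omega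
        simp only [hcast, ceil_step n q r m j hn h0 hr hjlt, hstart, hk2]
        rw [ih (j + 1) _ (by omega) (by omega)]
        have hrange : List.range' j (kn + 1 - 1) = j :: List.range' (j + 1) (kn - 1) := by
          have h1 : kn + 1 - 1 = (kn - 1) + 1 := by omega
          rw [h1, List.range'_succ]
        rw [hrange]
        simp

-- ===== VERDICT (by name: the statement is the Claim_ definition above) =====
theorem split_signal_spec : Claim_equal_split_signal := by
  intro seq ns oc _ hpre
  unfold Spec_split_signal split_signal split_signal_alt
  dsimp only
  rcases lt_or_gt_of_ne hpre with hneg | hns0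
  · -- num_segments < 0: A's lengths list is empty and both return [sequence[0:]]
    have htoNat : ns.toNat = 0 := by omega
    have hrem : PySem.Int.mod (seq.length : Int) ns ≤ 0 :=
      (PySem.Int.mod_neg_bounds (seq.length : Int) hneg).2
    rw [htoNat, PySem.List.pyRange_one_eq_nil hrem]
    simp only [List.replicate_zero, List.foldl_nil, PySem.List.slice_to_neg_one,
      List.dropLast_nil, List.nil_append]
    rw [pvLoop]
    rw [dif_neg (by omega)]
    simp
  · -- num_segments ≥ 1
    have hns : (1 : Int) ≤ ns := hns0
    set q := PySem.Int.floordiv (seq.length : Int) ns with hq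
    set rI := PySem.Int.mod (seq.length : Int) ns with hrIdef
    have hr0 : 0 ≤ rI := PySem.Int.mod_nonneg _ (by omega)
    have hrlt : rI < ns := PySem.Int.mod_lt _ (by omega)
    obtain ⟨m, hm⟩ : ∃ m : Nat, (m : Int) = ns := ⟨ns.toNat, by omega⟩
    obtain ⟨r, hr⟩ : ∃ r : Nat, (r : Int) = rI := ⟨rI.toNat, by omega⟩
    have hm1 : 1 ≤ m := by omega
    have hrm : r < m := by omega
    have htoNat : ns.toNat = m := by omega
    have hn : (seq.length : Int) = q * (m : Int) + rI := by
      have := PySem.Int.floordiv_mul_add_mod (seq.length : Int) ns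
      rw [← hq, ← hrIdef] at this
      rw [hm]
      omega
    rw [htoNat, ← hr, distribute_eq q m r (by omega)]
    set f := fun (j : Nat) => if (j : Int) < (r : Int) then q + 1 else q with hf
    have hL : (List.range m).map f = (List.range (m - 1)).map f ++ [f (m - 1)] := by
      conv_lhs => rw [show m = (m - 1) + 1 by omega, List.range_succ]
      simp
    rw [PySem.List.slice_to_neg_one, hL, List.dropLast_concat, fold_spec]
    simp only [List.length_map, List.length_range, List.nil_append, zero_add]
    have hsum : ((List.range (m - 1)).map f).sum = pvBnd q rI (m - 1) := by
      rw [← hr, ← take_sum_f q r (m - 1) (m - 1) le_rfl]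
      congr 1
      rw [List.take_of_length_le (by simp)]
    have hb0 : pvBnd q rI 0 = 0 := by
      unfold pvBnd
      simp
      omega
    have hgo := loop_spec seq oc (seq.length : Int) q rI m (by rw [hn]) hr0 (by omega) m 0 []
      (by omega) (by omega)
    rw [hb0] at hgo
    rw [← hm, hgo, ← List.range_eq_range', List.nil_append]
    congr 1
    · apply List.map_congr_left
      intro i hi
      have him : i < m - 1 := List.mem_range.mp hi
      rw [← hr, take_sum_f q r (m - 1) i (by omega), take_sum_f q r (m - 1) (i + 1) (by omega)]
    · rw [hsum]
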